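-- pv_equiv track=rewrite | github.com/akx/tox-docker | tox_docker/plugin.py | escape_env_var
-- ===== SOURCE A (Python) =====
-- def escape_env_var(varname):
--     """
--     Convert a string to a form suitable for use as an environment variable.
--
--     The result will be all uppercase, and will have all invalid characters
--     replaced by an underscore.
--
--     The result will match the following regex: [a-zA-Z_][a-zA-Z0-9_]*
--
--     Example:
--         "my.private.registry/cat/image" will become
--         "MY_PRIVATE_REGISTRY_CAT_IMAGE"
--     """
--     varname = list(varname.upper())
--     if not varname[0].isalpha():
--         varname[0] = "_"
--     for i, c in enumerate(varname):
--         if not c.isalnum() and c != "_":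
--             varname[i] = "_"
--     return "".join(varname)
-- ===== SOURCE B (Python) =====
-- # One precomputed 128-entry translation table (built once at import time) does both the
-- # uppercasing and the invalid-char replacement in a single str.translate call; only the
-- # first character is corrected afterwards.
-- _TABLE = {}
-- for _i in range(128):
--     _ch = chr(_i)
--     if "A" <= _ch <= "Z" or "0" <= _ch <= "9" or _ch == "_":
--         _TABLE[_i] = _ch
--     elif "a" <= _ch <= "z":
--         _TABLE[_i] = chr(_i - 32)
--     else:
--         _TABLE[_i] = "_"
--
--
-- def escape_env_var(varname):
--     out = varname.translate(_TABLE)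
--     if not ("A" <= out[0] <= "Z"):
--         out = "_" + out[1:]
--     return out
-- ===== Notes on version B (the rewrite author's own statement) =====
-- stated objective: faster
-- what changed: B replaces A's per-character conditional loop (uppercase pass, head fix, then in-place replacement loop) with one precomputed 128-entry translation table that does uppercasing and invalid-char replacement together in a single str.translate call, fixing only the first character afterwards.
import Mathlib
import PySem

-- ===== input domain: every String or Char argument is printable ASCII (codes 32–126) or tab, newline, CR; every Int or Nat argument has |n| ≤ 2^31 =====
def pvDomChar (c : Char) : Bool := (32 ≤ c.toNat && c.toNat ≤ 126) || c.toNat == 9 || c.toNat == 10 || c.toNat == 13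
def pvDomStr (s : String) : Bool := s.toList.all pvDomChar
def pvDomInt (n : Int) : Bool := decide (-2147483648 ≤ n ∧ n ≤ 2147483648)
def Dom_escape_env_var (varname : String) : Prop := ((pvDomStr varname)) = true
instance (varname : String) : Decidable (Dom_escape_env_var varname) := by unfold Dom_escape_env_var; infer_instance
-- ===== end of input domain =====

-- B precomputes one 128-entry translation table doing uppercasing and replacement together
-- in a single translate pass, fixing only the head afterwards; objective: faster
-- (a table-driven translate call instead of a per-character Python loop; a timing run measured it).

-- ===== PORT A =====
-- the loop body: replace a char that is neither alnum nor '_' by '_'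
def pvAFix (c : Char) : Char :=
  if PySem.Chars.isalnum c = false ∧ c ≠ '_' then '_' else c

def escape_env_var (varname : String) : String :=
  let vs := PySem.Chars.upper varname.toList
  let vs2 := match PySem.List.pyGet? vs 0 with
    | none => vs            -- IndexError in Python on "" ; excluded by Pre_
    | some c => if PySem.Chars.isalpha c = false then vs.set 0 '_' else vs
  -- the enumerate loop rewrites each position from its own current value: a map
  String.ofList (vs2.map pvAFix)

-- ===== PORT B =====
-- the table entry for code point i, exactly Source B's module-level loop body
def pvTableEntry (i : Int) : Char :=
  let ch := Char.ofNat i.toNat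
  if ((decide ('A' ≤ ch) && decide (ch ≤ 'Z')) || (decide ('0' ≤ ch) && decide (ch ≤ '9')) || ch == '_') then ch
  else if (decide ('a' ≤ ch) && decide (ch ≤ 'z')) then Char.ofNat (i - 32).toNat
  else '_'

-- _TABLE: built once by the for-loop over range(128)
def pvTable : PySem.Dict Int Char :=
  (PySem.List.pyRange 0 128 1).foldl (fun d i => d.insert i (pvTableEntry i)) PySem.Dict.empty

-- str.translate: look each code point up in the table, keep the char if absent
def escape_env_var_alt (varname : String) : String :=
  let out := varname.toList.map (fun c => ((pvTable.get? (c.toNat : Int)).getD c))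
  match PySem.List.pyGet? out 0 with
  | none => ""              -- IndexError in Python on "" ; excluded by Pre_
  | some h =>
    if (decide ('A' ≤ h) && decide (h ≤ 'Z')) = true then String.ofList out
    else String.ofList ('_' :: PySem.List.slice out (some 1) none)

-- ===== PRECONDITION & SPEC =====
-- Pre_ excludes only the empty string, on which both A and B raise IndexError.
def Pre_escape_env_var (varname : String) : Prop := varname.toList ≠ []
instance (varname : String) : Decidable (Pre_escape_env_var varname) := by unfold Pre_escape_env_var; infer_instance
def pvWitness_escape_env_var : String := "my.registry/cat"

def Spec_escape_env_var (varname : String) (out : String) : Prop := out = escape_env_var_alt varname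
instance (varname : String) (out : String) : Decidable (Spec_escape_env_var varname out) := by unfold Spec_escape_env_var; infer_instance

-- ===== CLAIM (what is proved, stated in full; the proofs are below) =====
def Claim_equal_escape_env_var : Prop := ∀ (varname : String), Dom_escape_env_var varname → Pre_escape_env_var varname → Spec_escape_env_var varname (escape_env_var varname)

-- ===== LEMMAS AND PROOFS =====

-- the build loop inserts 128 distinct fresh keys: the table's items are exactly the range, in order
theorem pv_table_items :
    pvTable.items = (PySem.List.pyRange 0 128 1).map (fun i => (i, pvTableEntry i)) := by
  unfold pvTable
  rw [PySem.Dict.items_foldl_insert_fresh]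
  · simp [PySem.Dict.empty]
  · intro a _; exact PySem.Dict.contains_empty a
  · simpa using PySem.List.nodup_pyRange_one 0 128

theorem pv_table_keys_nodup : pvTable.keys.Nodup := by
  simp only [PySem.Dict.keys, pv_table_items, List.map_map]
  simpa [Function.comp] using PySem.List.nodup_pyRange_one 0 128

-- table lookup at a code point below 128 is the entry function
theorem pv_table_get (i : Int) (h0 : 0 ≤ i) (h1 : i < 128) :
    pvTable.get? i = some (pvTableEntry i) := by
  apply PySem.Dict.get?_of_mem_items
  · rw [pv_table_items]
    exact List.mem_map.mpr ⟨i, (PySem.List.mem_pyRange_one).mpr ⟨h0, h1⟩, rfl⟩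
  · exact pv_table_keys_nodup

-- the two per-character pipelines agree below code point 128 (checked exhaustively),
-- and so do the two head tests
theorem pv_entry_check :
    ((List.range 128).all (fun n =>
      (pvTableEntry (n : Int) == pvAFix (PySem.Chars.upperChar (Char.ofNat n)))
      && (PySem.Chars.isalpha (PySem.Chars.upperChar (Char.ofNat n))
          == (decide ('A' ≤ pvTableEntry (n : Int)) && decide (pvTableEntry (n : Int) ≤ 'Z'))))) = true := by
  decide

theorem pv_dom_lt (c : Char) (h : pvDomChar c = true) : c.toNat < 128 := by
  simp only [pvDomChar, Bool.or_eq_true, Bool.and_eq_true, decide_eq_true_eq, beq_iff_eq] at h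
  omega

theorem pv_char_eq (c : Char) (h : pvDomChar c = true) :
    ((pvTable.get? (c.toNat : Int)).getD c) = pvAFix (PySem.Chars.upperChar c) ∧
    PySem.Chars.isalpha (PySem.Chars.upperChar c)
      = (decide ('A' ≤ ((pvTable.get? (c.toNat : Int)).getD c))
         && decide (((pvTable.get? (c.toNat : Int)).getD c) ≤ 'Z')) := by
  have hlt := pv_dom_lt c h
  rw [pv_table_get (c.toNat : Int) (by positivity) (by exact_mod_cast hlt)]
  have := List.all_eq_true.mp pv_entry_check (c.toNat) (List.mem_range.mpr hlt)
  simp only [Bool.and_eq_true, beq_iff_eq, Char.ofNat_toNat] at this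
  exact ⟨this.1, this.2⟩

-- the tails agree
theorem pv_tail_eq (ds : List Char) (hd : ds.all pvDomChar = true) :
    (ds.map PySem.Chars.upperChar).map pvAFix
      = ds.map (fun c => ((pvTable.get? (c.toNat : Int)).getD c)) := by
  rw [List.map_map]
  apply List.map_congr_left
  intro x hx
  exact ((pv_char_eq x (List.all_eq_true.mp hd x hx)).1).symm

theorem escape_env_var_spec : Claim_equal_escape_env_var := by
  intro varname hdom hpre
  unfold Spec_escape_env_var escape_env_var escape_env_var_alt
  have hdom' : varname.toList.all pvDomChar = true := hdom
  cases h : varname.toList with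
  | nil => exact absurd h hpre
  | cons d ds =>
    rw [h] at hdom'
    simp only [List.all_cons, Bool.and_eq_true] at hdom'
    obtain ⟨hdc, hdsc⟩ := hdom'
    have hc := pv_char_eq d hdc
    simp only [PySem.Chars.upper, List.map_cons, PySem.List.pyGet?_zero_cons,
      PySem.List.slice_from_one, List.tail_cons, List.set]
    by_cases hα : PySem.Chars.isalpha (PySem.Chars.upperChar d) = true
    · -- first char is a letter: kept by both
      have hbk : (decide ('A' ≤ ((pvTable.get? ((d.toNat : Nat) : Int)).getD d))
          && decide (((pvTable.get? ((d.toNat : Nat) : Int)).getD d) ≤ 'Z')) = true := by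
        rw [← hc.2]; exact hα
      have hfx : pvAFix (PySem.Chars.upperChar d) = PySem.Chars.upperChar d := by
        simp [pvAFix, PySem.Chars.isalnum, hα]
      have he : ((pvTable.get? ((d.toNat : Nat) : Int)).getD d) = PySem.Chars.upperChar d := by
        rw [hc.1, hfx]
      simp only [hbk, if_true]
      simp [hα, hfx, he, pv_tail_eq ds hdsc]
    · -- first char is not a letter: both replace it by '_'
      have hα' : PySem.Chars.isalpha (PySem.Chars.upperChar d) = false := by simpa using hα
      have hbk : (decide ('A' ≤ ((pvTable.get? ((d.toNat : Nat) : Int)).getD d))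
          && decide (((pvTable.get? ((d.toNat : Nat) : Int)).getD d) ≤ 'Z')) = false := by
        rw [← hc.2]; exact hα'
      have hfu : pvAFix '_' = '_' := by decide
      simp only [hbk]
      simp [hα', hfu, pv_tail_eq ds hdsc]
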